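-- pv_equiv track=rewrite | github.com/CEOJINSUNG/Algorithm | coding-test/yocode-1.py | solution
-- ===== SOURCE A (Python) =====
-- def solution(S):
--     b_exist = False
--
--     for char in S:
--         # b가 존재하면 true로 바꿈
--         if char == 'b':
--             b_exist = True
--         elif b_exist and char == 'a': # b가 존재하는 걸 알고나서 a를 발견한 경우 False
--             return False
--     return True
-- ===== SOURCE B (Python) =====
-- def solution(S):
--     if 'b' not in S:
--         return True
--     return 'a' not in S[S.index('b'):]
-- ===== Notes on version B (the rewrite author's own statement) =====
-- stated objective: simpler
-- what changed: Replaces the stateful flag loop with a locate-then-scan decomposition: find the index of the first forbidden-prefix character and check the suffix from there contains no offending character.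
import Mathlib
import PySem

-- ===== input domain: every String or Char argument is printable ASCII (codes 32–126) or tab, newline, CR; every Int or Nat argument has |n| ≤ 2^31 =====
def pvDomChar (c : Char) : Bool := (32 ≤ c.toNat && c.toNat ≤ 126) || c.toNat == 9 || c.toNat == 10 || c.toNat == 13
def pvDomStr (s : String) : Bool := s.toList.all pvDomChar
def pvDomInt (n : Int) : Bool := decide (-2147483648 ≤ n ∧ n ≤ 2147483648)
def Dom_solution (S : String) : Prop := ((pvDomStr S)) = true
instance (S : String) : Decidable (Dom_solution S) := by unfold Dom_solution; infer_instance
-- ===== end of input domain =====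

-- B replaces A's one-pass flag loop by locating the first 'b' and scanning the suffix for 'a' (simpler decomposition).

-- ===== PORT A =====
-- the flag loop of A: state = b_exist
def solutionAux : List Char → Bool → Bool
  | [], _ => true
  | c :: cs, bExist =>
    if c = 'b' then solutionAux cs true
    else if bExist && (c = 'a') then false
    else solutionAux cs bExist

def solution (S : String) : Bool := solutionAux S.toList false

-- ===== PORT B =====
def solution_alt (S : String) : Bool :=
  match PySem.List.index? S.toList 'b' with
  | none => true
  | some i => !((PySem.List.slice S.toList (some (i : Int)) none).contains 'a')

-- ===== PRECONDITION & SPEC =====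
def Spec_solution (S : String) (out : Bool) : Prop := out = solution_alt S
instance (S : String) (out : Bool) : Decidable (Spec_solution S out) := by unfold Spec_solution; infer_instance

-- ===== CLAIM (what is proved, stated in full; the proofs are below) =====
def Claim_equal_solution : Prop := ∀ (S : String), Dom_solution S → Spec_solution S (solution S)

-- ===== LEMMAS AND PROOFS =====

-- Once the flag is set, the loop simply scans for 'a'.
theorem solutionAux_true (cs : List Char) : solutionAux cs true = !(cs.contains 'a') := by
  induction cs with
  | nil => simp [solutionAux]
  | cons c cs ih =>
    by_cases hb : c = 'b'
    · subst hb; simp [solutionAux, ih]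
    · by_cases ha : c = 'a'
      · subst ha; simp [solutionAux]
      · simp only [solutionAux, ih]
        rw [if_neg hb, if_neg (by simp [ha])]
        rw [List.contains_cons, beq_eq_false_iff_ne.mpr (fun h => ha h.symm), Bool.false_or]

theorem solutionAux_false (cs : List Char) :
    solutionAux cs false =
      (match PySem.List.index? cs 'b' with
       | none => true
       | some i => !((cs.drop i).contains 'a')) := by
  induction cs with
  | nil => simp [solutionAux, PySem.List.index?]
  | cons c cs ih =>
    by_cases hb : c = 'b'
    · subst hb
      rw [PySem.List.index?_cons_self]
      simp [solutionAux, solutionAux_true]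
    · have hidx : PySem.List.index? (c :: cs) 'b' = (PySem.List.index? cs 'b').map (· + 1) :=
        PySem.List.index?_cons_of_ne cs hb
      rw [hidx]
      simp only [solutionAux]
      rw [if_neg hb, if_neg (by simp), ih]
      cases PySem.List.index? cs 'b' with
      | none => simp
      | some i => simp [List.drop]

-- ===== VERDICT (by name: the statement is the Claim_ definition above) =====
theorem solution_spec : Claim_equal_solution := by
  intro S _
  unfold Spec_solution solution solution_alt
  rw [solutionAux_false]
  cases h : PySem.List.index? S.toList 'b' with
  | none => rfl
  | some i =>
    simp only []
    rw [show ((i : Int)) = ((i : Nat) : Int) from rfl, PySem.List.slice_from_natCast]
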